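-- pv_equiv track=rewrite | github.com/qa8682/cctbx_project | scitbx/graph/utils.py | bond_bending_edge_sets
-- ===== SOURCE A (Python) =====
-- def bond_bending_edge_sets(edge_sets):
--   result = [set(edge_set) for edge_set in edge_sets]
--   for i,edge_set in enumerate(edge_sets):
--     for j in edge_set:
--       if (j < i): continue
--       for k in edge_sets[j]:
--         if (k == i): continue
--         result[i].add(k)
--       for k in edge_sets[i]:
--         if (k == j): continue
--         result[j].add(k)
--   return result
-- ===== SOURCE B (Python) =====
-- def bond_bending_edge_sets(edge_sets):
--   result = []
--   for m, edge_set in enumerate(edge_sets):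
--     s = set(edge_set)
--     for i in range(m):
--       if m in edge_sets[i]:
--         s |= edge_sets[i] - {m}
--     for j in edge_set:
--       if j >= m:
--         s |= edge_sets[j] - {m}
--     result.append(s)
--   return result
-- ===== Notes on version B (the rewrite author's own statement) =====
-- stated objective: alternative
-- what changed: Each node's bond-bending set is computed independently in one per-row pass (incoming contributions found by scanning earlier rows for membership, outgoing by walking the row itself), replacing A's pairwise symmetric accumulation with its j<i guard and cross-updates into result[j].
import Mathlib
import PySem

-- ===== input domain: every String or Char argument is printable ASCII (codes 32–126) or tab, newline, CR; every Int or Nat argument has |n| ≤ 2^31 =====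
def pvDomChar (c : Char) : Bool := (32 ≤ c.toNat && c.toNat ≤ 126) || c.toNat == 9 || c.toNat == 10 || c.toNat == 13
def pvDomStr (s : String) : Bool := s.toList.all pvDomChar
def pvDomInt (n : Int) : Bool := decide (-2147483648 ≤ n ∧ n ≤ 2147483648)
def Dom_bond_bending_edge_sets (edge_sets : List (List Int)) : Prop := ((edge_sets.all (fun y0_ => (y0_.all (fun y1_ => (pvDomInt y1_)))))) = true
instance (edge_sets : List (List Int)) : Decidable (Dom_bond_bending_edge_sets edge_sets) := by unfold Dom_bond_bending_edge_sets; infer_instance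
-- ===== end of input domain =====

-- B computes each node's bond-bending set independently in one per-row pass instead of A's
-- pairwise symmetric accumulation into a shared result (objective: alternative decomposition).

-- ===== PORT A =====
def bond_bending_edge_sets (edge_sets : List (List Int)) : List (List Int) :=
  (PySem.List.enumerate edge_sets).foldl
    (fun result p =>
      p.2.foldl
        (fun result j =>
          if j < p.1 then result
          else
            let r1 := PySem.List.pySetD result p.1
              ((PySem.List.pyGetD edge_sets j []).foldl
                (fun s k => if k = p.1 then s else PySem.Set.add s k)
                (PySem.List.pyGetD result p.1 []))
            PySem.List.pySetD r1 j
              ((PySem.List.pyGetD edge_sets p.1 []).foldl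
                (fun s k => if k = j then s else PySem.Set.add s k)
                (PySem.List.pyGetD r1 j [])))
        result)
    (edge_sets.map (fun e => PySem.Set.ofList e))

-- ===== PORT B =====
def bond_bending_edge_sets_alt (edge_sets : List (List Int)) : List (List Int) :=
  (PySem.List.enumerate edge_sets).foldl
    (fun result p =>
      let s0 : PySem.Set Int := PySem.Set.ofList p.2
      let s1 := (PySem.List.pyRange 0 p.1 1).foldl
        (fun s i =>
          if (PySem.List.pyGetD edge_sets i []).contains p.1 then
            PySem.Set.union s (PySem.Set.diff (PySem.List.pyGetD edge_sets i []) [p.1])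
          else s) s0
      let s2 := p.2.foldl
        (fun s j =>
          if p.1 ≤ j then
            PySem.Set.union s (PySem.Set.diff (PySem.List.pyGetD edge_sets j []) [p.1])
          else s) s1
      result ++ [s2])
    []

-- ===== PRECONDITION & SPEC =====
-- Pre_ excludes exactly the inputs where A raises IndexError: an entry j ≥ len(edge_sets)
-- (negative entries are skipped by A's `j < i` guard and raise nothing).
def Pre_bond_bending_edge_sets (edge_sets : List (List Int)) : Prop :=
  ∀ row ∈ edge_sets, ∀ j ∈ row, j < (edge_sets.length : Int)
instance (edge_sets : List (List Int)) : Decidable (Pre_bond_bending_edge_sets edge_sets) := by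
  unfold Pre_bond_bending_edge_sets; infer_instance

def pvWitness_bond_bending_edge_sets : List (List Int) := [[1], [0, 2], [1]]

def Spec_bond_bending_edge_sets (edge_sets : List (List Int)) (out : List (List Int)) : Prop := out = bond_bending_edge_sets_alt edge_sets
instance (edge_sets : List (List Int)) (out : List (List Int)) : Decidable (Spec_bond_bending_edge_sets edge_sets out) := by unfold Spec_bond_bending_edge_sets; infer_instance

-- ===== CLAIM (what is proved, stated in full; the proofs are below) =====
def Claim_equal_bond_bending_edge_sets : Prop := ∀ (edge_sets : List (List Int)), Dom_bond_bending_edge_sets edge_sets → Pre_bond_bending_edge_sets edge_sets → Spec_bond_bending_edge_sets edge_sets (bond_bending_edge_sets edge_sets)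

-- ===== LEMMAS AND PROOFS =====

-- `gacc m l s` = fold "add every k of l except m" into the set s (the shared inner-loop shape).
def gacc (m : Int) (l : List Int) (s : List Int) : List Int :=
  l.foldl (fun s k => if k = m then s else PySem.Set.add s k) s

lemma mem_gacc {x : Int} (m : Int) (l : List Int) (s : List Int) (hx : x ∈ s) : x ∈ gacc m l s := by
  induction l generalizing s with
  | nil => exact hx
  | cons a l ih =>
    simp only [gacc, List.foldl_cons]
    split
    · exact ih s hx
    · exact ih _ (by simp [PySem.Set.mem_add, hx])

lemma mem_gacc_of_mem {x : Int} {m : Int} {l : List Int} (s : List Int) (hl : x ∈ l) (hx : x ≠ m) :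
    x ∈ gacc m l s := by
  induction l generalizing s with
  | nil => simp at hl
  | cons a l ih =>
    simp only [gacc, List.foldl_cons]
    rcases List.mem_cons.mp hl with rfl | h
    · rw [if_neg hx]
      exact mem_gacc _ _ _ (by simp [PySem.Set.mem_add])
    · split
      · exact ih s h
      · exact ih _ h


lemma filter_foldl_add (l : List Int) (m : Int) (s : List Int) :
    (l.filter (fun x => !decide (x = m))).foldl PySem.Set.add s = gacc m l s := by
  induction l generalizing s with
  | nil => rfl
  | cons a l ih =>
    by_cases hm : a = m
    · simp [hm, ih, gacc, List.foldl_cons]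
    · simp only [List.filter_cons, hm, decide_false, Bool.not_false, if_pos, List.foldl_cons]
      simp only [gacc, List.foldl_cons]
      rw [if_neg hm]
      exact ih _

lemma union_diff_eq_gacc (s l : List Int) (m : Int) :
    PySem.Set.union s (PySem.Set.diff l [m]) = gacc m l s := by
  have : PySem.Set.diff l [m] = l.filter (fun x => !decide (x = m)) := by
    simp [PySem.Set.diff, PySem.Set.contains]
  rw [PySem.Set.union, PySem.Set.update, this, filter_foldl_add]

lemma gacc_eq_of_subset {m : Int} {l s : List Int} (h : ∀ k ∈ l, k ≠ m → k ∈ s) :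
    gacc m l s = s := by
  induction l generalizing s with
  | nil => rfl
  | cons a l ih =>
    simp only [gacc, List.foldl_cons]
    split
    · exact ih (fun k hk => h k (List.mem_cons_of_mem _ hk))
    · rename_i hne
      rw [PySem.Set.add_of_mem (h a (List.mem_cons_self) hne)]
      exact ih (fun k hk => h k (List.mem_cons_of_mem _ hk))

lemma gacc_idem (m : Int) (l s : List Int) : gacc m l (gacc m l s) = gacc m l s :=
  gacc_eq_of_subset (fun _ hk hne => mem_gacc_of_mem _ hk hne)

def baseS (es : List (List Int)) (m : Nat) : List Int := PySem.Set.ofList (es.getD m [])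
def incS (es : List (List Int)) (t m : Nat) : List Int :=
  (List.range t).foldl
    (fun s i => if (es.getD i []).contains (m : Int) then gacc (m : Int) (es.getD i []) s else s)
    (baseS es m)
def fwdS (es : List (List Int)) (t : Nat) (p : List Int) (s : List Int) : List Int :=
  p.foldl (fun s j => if j < (t : Int) then s else gacc (t : Int) (es.getD j.toNat []) s) s

lemma mem_foldl_pres {β : Type} {f : List Int → β → List Int}
    (hf : ∀ s b, ∀ x ∈ s, x ∈ f s b) (l : List β) (s : List Int) {x : Int} (hx : x ∈ s) :
    x ∈ l.foldl f s := by
  induction l generalizing s with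
  | nil => exact hx
  | cons a l ih => exact ih _ (hf s a x hx)

lemma mem_incS {x : Int} {es : List (List Int)} {t m : Nat} (hx : x ∈ baseS es m) :
    x ∈ incS es t m := by
  refine mem_foldl_pres (fun s b y hy => ?_) _ _ hx
  dsimp only
  split
  · exact mem_gacc _ _ _ hy
  · exact hy

lemma mem_fwdS {x : Int} {es : List (List Int)} {t : Nat} {p s : List Int} (hx : x ∈ s) :
    x ∈ fwdS es t p s := by
  refine mem_foldl_pres (fun s b y hy => ?_) _ _ hx
  dsimp only
  split
  · exact hy
  · exact mem_gacc _ _ _ hy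

lemma fwdS_append (es : List (List Int)) (t : Nat) (p : List Int) (j : Int) (s : List Int) :
    fwdS es t (p ++ [j]) s =
      if j < (t : Int) then fwdS es t p s else gacc (t : Int) (es.getD j.toNat []) (fwdS es t p s) := by
  simp only [fwdS, List.foldl_append, List.foldl_cons, List.foldl_nil]

lemma pyGetD_nonneg_getD (xs : List (List Int)) (j : Int) (h : 0 ≤ j) :
    PySem.List.pyGetD xs j [] = xs.getD j.toNat [] := by
  have : j = ((j.toNat : Nat) : Int) := (Int.toNat_of_nonneg h).symm
  rw [this, PySem.List.pyGetD_natCast]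
  congr 2

lemma pyGetD_map_range (F : Nat → List Int) (n : Nat) (j : Int) (h0 : 0 ≤ j) (h : j < (n : Int)) :
    PySem.List.pyGetD ((List.range n).map F) j [] = F j.toNat := by
  rw [pyGetD_nonneg_getD _ _ h0]
  have hj : j.toNat < n := by omega
  simp [List.getD, hj]

lemma pySetD_map_range (F : Nat → List Int) (n : Nat) (j : Int) (v : List Int) (h0 : 0 ≤ j) (_h : j < (n : Int)) :
    PySem.List.pySetD ((List.range n).map F) j v =
      (List.range n).map (fun m => if m = j.toNat then v else F m) := by
  rw [PySem.List.pySetD_of_nonneg _ v h0]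
  apply List.ext_getElem
  · simp
  · intro k h1 h2
    have hk : k < n := by simpa using h1
    by_cases hkj : k = j.toNat
    · simp [hkj]
    · simp only [List.getElem_set, List.getElem_map, List.getElem_range]
      rw [if_neg (by omega), if_neg hkj]

def finalS (es : List (List Int)) (m : Nat) : List Int := fwdS es m (es.getD m []) (incS es m m)
def midF (es : List (List Int)) (t : Nat) (p : List Int) (m : Nat) : List Int :=
  if m < t then finalS es m
  else if m = t then fwdS es t p (incS es t t)
  else if (m : Int) ∈ p then gacc (m : Int) (es.getD t []) (incS es t m) else incS es t m

lemma foldl_gacc (m : Int) (l s : List Int) :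
    l.foldl (fun s k => if k = m then s else PySem.Set.add s k) s = gacc m l s := rfl

lemma pyGetD_map_range_nat (F : Nat → List Int) (n t : Nat) (h : t < n) :
    PySem.List.pyGetD ((List.range n).map F) ((t : Nat) : Int) [] = F t := by
  rw [pyGetD_map_range _ _ _ (by positivity) (by exact_mod_cast h)]
  simp

lemma pySetD_map_range_nat (F : Nat → List Int) (n t : Nat) (v : List Int) (h : t < n) :
    PySem.List.pySetD ((List.range n).map F) ((t : Nat) : Int) v =
      (List.range n).map (fun m => if m = t then v else F m) := by
  rw [pySetD_map_range _ _ _ _ (by positivity) (by exact_mod_cast h)]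
  simp

lemma A_inner_step (es : List (List Int)) (t : Nat) (ht : t < es.length) (j : Int)
    (hj : j < (es.length : Int)) (p : List Int) :
    (if j < ((t : Nat) : Int) then (List.range es.length).map (midF es t p)
     else
       let r1 := PySem.List.pySetD ((List.range es.length).map (midF es t p)) ((t : Nat) : Int)
         ((PySem.List.pyGetD es j []).foldl
           (fun s k => if k = ((t : Nat) : Int) then s else PySem.Set.add s k)
           (PySem.List.pyGetD ((List.range es.length).map (midF es t p)) ((t : Nat) : Int) []))
       PySem.List.pySetD r1 j
         ((PySem.List.pyGetD es ((t : Nat) : Int) []).foldl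
           (fun s k => if k = j then s else PySem.Set.add s k)
           (PySem.List.pyGetD r1 j [])))
    = (List.range es.length).map (midF es t (p ++ [j])) := by
  by_cases hjt : j < ((t : Nat) : Int)
  · rw [if_pos hjt]
    apply List.map_congr_left
    intro m hm
    rw [List.mem_range] at hm
    by_cases h1 : m < t
    · simp [midF, h1]
    by_cases h2 : m = t
    · subst h2
      have hfw : fwdS es m (p ++ [j]) (incS es m m) = fwdS es m p (incS es m m) := by
        rw [fwdS_append, if_pos hjt]
      simp [midF, hfw]
    · have hmt : t < m := by omega
      have hmem : ((m : Int) ∈ p ++ [j]) ↔ (m : Int) ∈ p := by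
        simp only [List.mem_append, List.mem_singleton, or_iff_left_iff_imp]
        intro he
        exfalso
        have : ((t:Nat):Int) < (m:Int) := by exact_mod_cast hmt
        omega
      simp only [midF, h1, h2, if_false]
      split_ifs with hA hB hB
      · rfl
      · exact absurd (hmem.mpr hA) hB
      · exact absurd (hmem.mp hB) hA
      · rfl
  · rw [if_neg hjt]
    have h0 : (0 : Int) ≤ j := le_trans (by positivity) (not_lt.mp hjt)
    obtain ⟨u, rfl⟩ : ∃ u : Nat, j = (u : Int) := ⟨j.toNat, (Int.toNat_of_nonneg h0).symm⟩
    have hun : u < es.length := by exact_mod_cast hj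
    have htu : t ≤ u := by exact_mod_cast not_lt.mp hjt
    simp only [foldl_gacc]
    rw [pyGetD_map_range_nat _ _ _ ht, pySetD_map_range_nat _ _ _ _ ht]
    rw [show PySem.List.pyGetD es ((u:Nat):Int) [] = es.getD u [] by
      rw [PySem.List.pyGetD_natCast]]
    rw [show PySem.List.pyGetD es ((t:Nat):Int) [] = es.getD t [] by
      rw [PySem.List.pyGetD_natCast]]
    rw [pyGetD_map_range_nat _ _ _ hun, pySetD_map_range_nat _ _ _ _ hun]
    apply List.map_congr_left
    intro m hm
    rw [List.mem_range] at hm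
    beta_reduce
    have hmidt : midF es t p t = fwdS es t p (incS es t t) := by
      rw [midF, if_neg (lt_irrefl t), if_pos rfl]
    by_cases hmm : m = u
    · rw [if_pos hmm]
      by_cases ht2 : u = t
      · rw [if_pos ht2, ht2, hmidt, hmm, ht2]
        have hR : midF es t (p ++ [((t:Nat):Int)]) t =
            gacc ((t:Nat):Int) (es.getD t []) (fwdS es t p (incS es t t)) := by
          rw [midF, if_neg (lt_irrefl t), if_pos rfl, fwdS_append,
            if_neg (lt_irrefl _)]
          simp
        rw [hR]
        exact gacc_eq_of_subset (fun k hk hne => mem_gacc _ _ _ (mem_fwdS (mem_incS (by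
          rw [baseS, PySem.Set.mem_ofList]; exact hk))))
      · rw [if_neg ht2]
        have htm : t < u := lt_of_le_of_ne htu (Ne.symm ht2)
        have hRm : midF es t (p ++ [((u:Nat):Int)]) m =
            gacc ((u : Nat) : Int) (es.getD t []) (incS es t u) := by
          rw [hmm, midF, if_neg (by omega), if_neg ht2,
            if_pos (List.mem_append_right _ (List.mem_singleton.mpr rfl))]
        rw [hRm, midF, if_neg (by omega), if_neg ht2]
        by_cases hp : ((u : Nat) : Int) ∈ p
        · rw [if_pos hp, gacc_idem]
        · rw [if_neg hp]
    · rw [if_neg hmm]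
      by_cases h2 : m = t
      · rw [if_pos h2, h2, hmidt, midF, if_neg (lt_irrefl t), if_pos rfl, fwdS_append,
          if_neg hjt]
        simp
      · rw [if_neg h2]
        by_cases h1 : m < t
        · rw [midF, if_pos h1, midF, if_pos h1]
        · have hne : ((m:Int)) ≠ ((u:Nat):Int) := by exact_mod_cast hmm
          rw [midF, if_neg h1, if_neg h2, midF, if_neg h1, if_neg h2]
          by_cases hp : ((m:Int)) ∈ p
          · rw [if_pos hp, if_pos (List.mem_append_left _ hp)]
          · rw [if_neg hp, if_neg (by simp [hp, hne])]

lemma A_inner (es : List (List Int)) (t : Nat) (ht : t < es.length) (q p : List Int)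
    (hq : ∀ j ∈ q, j < (es.length : Int)) :
    q.foldl
      (fun result j =>
        if j < ((t : Nat) : Int) then result
        else
          let r1 := PySem.List.pySetD result ((t : Nat) : Int)
            ((PySem.List.pyGetD es j []).foldl
              (fun s k => if k = ((t : Nat) : Int) then s else PySem.Set.add s k)
              (PySem.List.pyGetD result ((t : Nat) : Int) []))
          PySem.List.pySetD r1 j
            ((PySem.List.pyGetD es ((t : Nat) : Int) []).foldl
              (fun s k => if k = j then s else PySem.Set.add s k)
              (PySem.List.pyGetD r1 j [])))
      ((List.range es.length).map (midF es t p))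
    = (List.range es.length).map (midF es t (p ++ q)) := by
  induction q generalizing p with
  | nil => simp
  | cons j q ih =>
    rw [List.foldl_cons]
    have hstep := A_inner_step es t ht j (hq j (List.mem_cons_self)) p
    simp only at hstep ⊢
    rw [hstep, ih (p ++ [j]) (fun x hx => hq x (List.mem_cons_of_mem _ hx)), List.append_assoc]
    rfl

lemma midF_nil_ge (es : List (List Int)) (t m : Nat) (h : t ≤ m) :
    midF es t [] m = incS es t m := by
  by_cases h2 : m = t
  · subst h2
    rw [midF, if_neg (lt_irrefl m), if_pos rfl]
    rfl
  · rw [midF, if_neg (by omega), if_neg h2, if_neg (by simp)]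

lemma incS_succ (es : List (List Int)) (t m : Nat) :
    incS es (t + 1) m =
      if (es.getD t []).contains ((m:Nat):Int) then gacc ((m:Nat):Int) (es.getD t []) (incS es t m)
      else incS es t m := by
  rw [incS, List.range_succ, List.foldl_append, List.foldl_cons, List.foldl_nil]
  rfl

lemma midF_full (es : List (List Int)) (t m : Nat) (_hm : m < es.length) :
    midF es t (es.getD t []) m = midF es (t + 1) [] m := by
  by_cases h1 : m < t
  · rw [midF, if_pos h1, midF, if_pos (by omega)]
  by_cases h2 : m = t
  · subst h2
    rw [midF, if_neg h1, if_pos rfl, midF, if_pos (by omega)]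
    rfl
  · have htm : t < m := by omega
    have hL : midF es t (es.getD t []) m =
        if ((m:Int)) ∈ es.getD t [] then gacc ((m:Nat):Int) (es.getD t []) (incS es t m)
        else incS es t m := by
      rw [midF, if_neg h1, if_neg h2]
    have hR : midF es (t + 1) [] m = incS es (t + 1) m := midF_nil_ge es _ _ (by omega)
    rw [hL, hR, incS_succ]
    have hcont : ((es.getD t []).contains ((m:Nat):Int)) = decide (((m:Nat):Int) ∈ es.getD t []) := by
      simp
    by_cases hp : ((m : Nat) : Int) ∈ es.getD t []
    · rw [if_pos hp, hcont, if_pos (by simpa using hp)]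
    · rw [if_neg hp, hcont, if_neg (by simpa using hp)]


lemma A_outer (es : List (List Int)) (hpre : ∀ row ∈ es, ∀ j ∈ row, j < (es.length : Int)) :
    ∀ (suf : List (List Int)) (t : Nat), es.drop t = suf →
    (PySem.List.enumerate suf ((t : Nat) : Int)).foldl
      (fun result p =>
        p.2.foldl
          (fun result j =>
            if j < p.1 then result
            else
              let r1 := PySem.List.pySetD result p.1
                ((PySem.List.pyGetD es j []).foldl
                  (fun s k => if k = p.1 then s else PySem.Set.add s k)
                  (PySem.List.pyGetD result p.1 []))
              PySem.List.pySetD r1 j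
                ((PySem.List.pyGetD es p.1 []).foldl
                  (fun s k => if k = j then s else PySem.Set.add s k)
                  (PySem.List.pyGetD r1 j [])))
          result)
      ((List.range es.length).map (midF es t []))
    = (List.range es.length).map (midF es (t + suf.length) []) := by
  intro suf
  induction suf with
  | nil =>
    intro t _
    simp [PySem.List.enumerate]
  | cons row suf ih =>
    intro t hdrop
    have h1 : es[t]? = some row := by
      rw [← Nat.add_zero t, ← List.getElem?_drop, hdrop]
      rfl
    have ht : t < es.length := by
      rcases List.getElem?_eq_some_iff.mp h1 with ⟨h', _⟩
      exact h'
    have hget : es.getD t [] = row := by simp [List.getD, h1]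
    have hmem : row ∈ es := by
      have := List.getElem_mem ht
      rwa [(List.getElem?_eq_some_iff.mp h1).2] at this
    have hdrop' : es.drop (t + 1) = suf := by
      rw [← List.drop_drop, hdrop, List.drop_one]
      rfl
    rw [PySem.List.enumerate_cons, List.foldl_cons]
    have hinner := A_inner es t ht row []
      (fun j hj => hpre row hmem j hj)
    simp only [List.nil_append] at hinner
    simp only
    rw [hinner]
    have hmidfull : (List.range es.length).map (midF es t row) =
        (List.range es.length).map (midF es (t + 1) []) := by
      apply List.map_congr_left
      intro m hm
      rw [List.mem_range] at hm
      rw [← hget]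
      exact midF_full es t m hm
    rw [hmidfull]
    have hcast : ((t : Nat) : Int) + 1 = (((t + 1 : Nat)) : Int) := by push_cast; ring
    rw [hcast, ih (t + 1) hdrop']
    rw [show t + 1 + suf.length = t + (row :: suf).length from by simp; omega]

lemma A_eq_map (es : List (List Int)) (hpre : ∀ row ∈ es, ∀ j ∈ row, j < (es.length : Int)) :
    bond_bending_edge_sets es = (List.range es.length).map (finalS es) := by
  unfold bond_bending_edge_sets
  have h0 : es.map (fun e => PySem.Set.ofList e) =
      (List.range es.length).map (midF es 0 []) := by
    apply List.ext_getElem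
    · simp
    · intro k h1 h2
      have hk : k < es.length := by simpa using h1
      rw [List.getElem_map, List.getElem_map, List.getElem_range,
        midF_nil_ge es 0 k (Nat.zero_le _)]
      simp only [incS, List.range_zero, List.foldl_nil, baseS]
      congr 1
      simp [List.getD, List.getElem?_eq_getElem hk]
  rw [h0]
  have houter := A_outer es hpre es 0 rfl
  rw [Nat.cast_zero] at houter
  rw [houter]
  apply List.map_congr_left
  intro m hm
  rw [List.mem_range] at hm
  rw [midF, if_pos (by simpa using hm)]


lemma B_body (es : List (List Int)) (t : Nat) (row : List Int) (hrow : es.getD t [] = row) :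
    (let s0 : PySem.Set Int := PySem.Set.ofList row
     let s1 := (PySem.List.pyRange 0 ((t : Nat) : Int) 1).foldl
       (fun s i =>
         if (PySem.List.pyGetD es i []).contains ((t : Nat) : Int) then
           PySem.Set.union s (PySem.Set.diff (PySem.List.pyGetD es i []) [((t : Nat) : Int)])
         else s) s0
     row.foldl
       (fun s j =>
         if ((t : Nat) : Int) ≤ j then
           PySem.Set.union s (PySem.Set.diff (PySem.List.pyGetD es j []) [((t : Nat) : Int)])
         else s) s1)
    = finalS es t := by
  simp only
  have hs1 : (PySem.List.pyRange 0 ((t : Nat) : Int) 1).foldl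
       (fun s i =>
         if (PySem.List.pyGetD es i []).contains ((t : Nat) : Int) then
           PySem.Set.union s (PySem.Set.diff (PySem.List.pyGetD es i []) [((t : Nat) : Int)])
         else s) (PySem.Set.ofList row) = incS es t t := by
    rw [PySem.List.pyRange_one, List.foldl_map]
    have harg : ((((t:Nat):Int) - 0).toNat) = t := by omega
    rw [harg]
    have hfun : (fun (s : List Int) (k : Nat) =>
        if (PySem.List.pyGetD es (0 + (k : Int)) []).contains ((t : Nat) : Int) then
          PySem.Set.union s (PySem.Set.diff (PySem.List.pyGetD es (0 + (k : Int)) []) [((t : Nat) : Int)])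
        else s) =
        (fun (s : List Int) (i : Nat) =>
          if (es.getD i []).contains ((t:Nat):Int) then gacc ((t:Nat):Int) (es.getD i []) s else s) := by
      funext s k
      rw [zero_add, PySem.List.pyGetD_natCast, union_diff_eq_gacc]
    rw [hfun, incS, baseS, hrow]
  rw [hs1]
  have hfun2 : (fun (s : List Int) (j : Int) =>
      if ((t : Nat) : Int) ≤ j then
        PySem.Set.union s (PySem.Set.diff (PySem.List.pyGetD es j []) [((t : Nat) : Int)])
      else s) =
      (fun (s : List Int) (j : Int) =>
        if j < ((t:Nat):Int) then s else gacc ((t:Nat):Int) (es.getD j.toNat []) s) := by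
    funext s j
    by_cases h : ((t : Nat) : Int) ≤ j
    · rw [if_pos h, if_neg (not_lt.mpr h), pyGetD_nonneg_getD es j (le_trans (by positivity) h),
        union_diff_eq_gacc]
    · rw [if_neg h, if_pos (not_le.mp h)]
  rw [hfun2, ← fwdS, ← hrow, ← finalS]

lemma B_outer (es : List (List Int)) :
    ∀ (suf : List (List Int)) (t : Nat) (acc : List (List Int)), es.drop t = suf →
    (PySem.List.enumerate suf ((t : Nat) : Int)).foldl
      (fun result p =>
        let s0 : PySem.Set Int := PySem.Set.ofList p.2
        let s1 := (PySem.List.pyRange 0 p.1 1).foldl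
          (fun s i =>
            if (PySem.List.pyGetD es i []).contains p.1 then
              PySem.Set.union s (PySem.Set.diff (PySem.List.pyGetD es i []) [p.1])
            else s) s0
        let s2 := p.2.foldl
          (fun s j =>
            if p.1 ≤ j then
              PySem.Set.union s (PySem.Set.diff (PySem.List.pyGetD es j []) [p.1])
            else s) s1
        result ++ [s2])
      acc
    = acc ++ (List.range' t suf.length).map (finalS es) := by
  intro suf
  induction suf with
  | nil => intro t acc _; simp [PySem.List.enumerate]
  | cons row suf ih =>
    intro t acc hdrop
    have hget : es.getD t [] = row := by
      have h1 : es[t]? = some row := by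
        rw [← Nat.add_zero t, ← List.getElem?_drop, hdrop]
        rfl
      simp [List.getD, h1]
    have hdrop' : es.drop (t + 1) = suf := by
      rw [← List.drop_drop, hdrop, List.drop_one]
      rfl
    rw [PySem.List.enumerate_cons, List.foldl_cons]
    simp only
    rw [B_body es t row hget]
    have hcast : ((t : Nat) : Int) + 1 = (((t + 1 : Nat)) : Int) := by push_cast; ring
    rw [hcast, ih (t + 1) _ hdrop', show (row::suf).length = suf.length + 1 from rfl,
      List.range'_succ, List.map_cons]
    simp

lemma B_eq_map (es : List (List Int)) :
    bond_bending_edge_sets_alt es = (List.range es.length).map (finalS es) := by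
  unfold bond_bending_edge_sets_alt
  have h := B_outer es es 0 [] rfl
  rw [Nat.cast_zero] at h
  rw [h]
  simp [List.range_eq_range']

-- ===== VERDICT (by name: the statement is the Claim_ definition above) =====
theorem bond_bending_edge_sets_spec : Claim_equal_bond_bending_edge_sets := by
  intro es _ hpre
  unfold Spec_bond_bending_edge_sets
  rw [A_eq_map es hpre, B_eq_map es]
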